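-- pv_equiv track=rewrite | github.com/chamathAn/safelora | Revisions/Finetune_LLM/Dataset_Preprocessing/preprocess_griculture-Plan-Diseases-QA-Pairs-Dataset.py | pick_paragraph_col
-- ===== SOURCE A (Python) =====
-- def pick_paragraph_col(fieldnames):
--     candidates = [
--         "question.paragraph", "question_paragraph", "paragraph", "context", "passage"
--     ]
--     for fn in fieldnames:
--         if fn in candidates:
--             return fn
--     # fallback: any header containing both "question" and "paragraph"
--     for fn in fieldnames:
--         if "question" in fn and "paragraph" in fn:
--             return fn
--     return None
-- ===== SOURCE B (Python) =====
-- def pick_paragraph_col(fieldnames):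
--     # single pass: exact candidates return immediately; first substring hit is kept as deferred fallback
--     candidates = {"question.paragraph", "question_paragraph", "paragraph", "context", "passage"}
--     fallback = None
--     for fn in fieldnames:
--         if fn in candidates:
--             return fn
--         if fallback is None and "question" in fn and "paragraph" in fn:
--             fallback = fn
--     return fallback
-- ===== Notes on version B (the rewrite author's own statement) =====
-- stated objective: alternative
-- what changed: Replaces A's two sequential scans (exact-match pass, then substring-fallback pass) by a single pass that returns exact matches immediately and carries the first substring match as a deferred fallback.
import Mathlib
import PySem

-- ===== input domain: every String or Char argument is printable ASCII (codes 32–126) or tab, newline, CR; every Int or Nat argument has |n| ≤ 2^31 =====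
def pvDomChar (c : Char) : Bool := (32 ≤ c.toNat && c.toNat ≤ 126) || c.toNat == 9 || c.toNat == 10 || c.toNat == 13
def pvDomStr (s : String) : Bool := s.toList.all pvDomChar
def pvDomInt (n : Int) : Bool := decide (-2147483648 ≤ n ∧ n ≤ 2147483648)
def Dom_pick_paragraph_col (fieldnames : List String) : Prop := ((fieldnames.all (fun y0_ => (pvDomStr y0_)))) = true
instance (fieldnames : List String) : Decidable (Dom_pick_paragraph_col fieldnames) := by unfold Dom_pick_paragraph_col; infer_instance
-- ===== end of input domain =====

-- One-pass re-implementation: exact candidate matches return immediately, the first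
-- substring match is carried as a deferred fallback (alternative decomposition, same cost).


-- ===== PORT A =====
-- the exact candidate list of A
def pvCandidates : List String :=
  ["question.paragraph", "question_paragraph", "paragraph", "context", "passage"]

-- "question" in fn and "paragraph" in fn
def pvBoth (fn : String) : Bool :=
  PySem.Str.isIn "question" fn && PySem.Str.isIn "paragraph" fn

-- first loop: first fn in candidates
def pickExactLoop : List String → Option String
  | [] => none
  | fn :: rest => if pvCandidates.contains fn then some fn else pickExactLoop rest

-- second loop: first fn containing both substrings
def pickBothLoop : List String → Option String
  | [] => none
  | fn :: rest => if pvBoth fn then some fn else pickBothLoop rest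

def pick_paragraph_col (fieldnames : List String) : Option String :=
  match pickExactLoop fieldnames with
  | some fn => some fn
  | none => pickBothLoop fieldnames

-- ===== PORT B =====
-- single loop carrying the fallback
def pickAltLoop : List String → Option String → Option String
  | [], fallback => fallback
  | fn :: rest, fallback =>
      if pvCandidates.contains fn then some fn
      else if fallback.isNone && pvBoth fn then pickAltLoop rest (some fn)
      else pickAltLoop rest fallback

def pick_paragraph_col_alt (fieldnames : List String) : Option String :=
  pickAltLoop fieldnames none

-- ===== PRECONDITION & SPEC =====
def Spec_pick_paragraph_col (fieldnames : List String) (out : Option String) : Prop := out = pick_paragraph_col_alt fieldnames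
instance (fieldnames : List String) (out : Option String) : Decidable (Spec_pick_paragraph_col fieldnames out) := by unfold Spec_pick_paragraph_col; infer_instance

-- ===== CLAIM (what is proved, stated in full; the proofs are below) =====
def Claim_equal_pick_paragraph_col : Prop := ∀ (fieldnames : List String), Dom_pick_paragraph_col fieldnames → Spec_pick_paragraph_col fieldnames (pick_paragraph_col fieldnames)

-- ===== LEMMAS AND PROOFS =====

-- loop invariant: the one-pass loop equals "exact match, else fallback, else substring match"
theorem pickAltLoop_eq (xs : List String) : ∀ (fb : Option String),
    pickAltLoop xs fb =
      match pickExactLoop xs with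
      | some fn => some fn
      | none => match fb with
                | some v => some v
                | none => pickBothLoop xs := by
  induction xs with
  | nil => intro fb; cases fb <;> simp [pickAltLoop, pickExactLoop, pickBothLoop]
  | cons fn rest ih =>
    intro fb
    by_cases hc : fn ∈ pvCandidates
    · simp [pickAltLoop, pickExactLoop, hc]
    · by_cases hb : pvBoth fn = true
      · cases fb with
        | none =>
          simp [pickAltLoop, pickExactLoop, pickBothLoop, hc, hb, ih (some fn)]
        | some v =>
          simp [pickAltLoop, pickExactLoop, hc, hb, ih (some v)]
      · cases fb with
        | none =>
          simp [pickAltLoop, pickExactLoop, pickBothLoop, hc, hb, ih none]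
        | some v =>
          simp [pickAltLoop, pickExactLoop, hc, hb, ih (some v)]

-- ===== VERDICT (by name: the statement is the Claim_ definition above) =====
theorem pick_paragraph_col_spec : Claim_equal_pick_paragraph_col := by
  intro fieldnames _
  unfold Spec_pick_paragraph_col pick_paragraph_col pick_paragraph_col_alt
  rw [pickAltLoop_eq]
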